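-- pv_equiv track=rewrite | github.com/PaddlePaddle/awesome-DeepLearning | Paddle_Industry_Practice_Sample_Library/nlp_projects/relation_extraction/ernie/utils/utils.py | _decoding_by_label
-- ===== SOURCE A (Python) =====
-- def _decoding_by_label(label_logits):
--     labels = []
--     i, lens = 0, len(label_logits)
--     last_yes = False
--     while i < lens:
--         if label_logits[i] == 0:
--             last_yes=False
--         else:
--             if last_yes:
--                 if i==0:
--                     labels.append([])
--                 labels[-1].append(i)
--             else:
--                 labels.append([])
--                 labels[-1].append(i)
--             last_yes=True
--         i += 1
--
--     return labels
-- ===== SOURCE B (Python) =====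
-- from itertools import groupby
--
--
-- def _decoding_by_label(label_logits):
--     labels = []
--     for key, group in groupby(enumerate(label_logits), key=lambda p: p[1] != 0):
--         if key:
--             labels.append([idx for idx, _ in group])
--     return labels
-- ===== Notes on version B (the rewrite author's own statement) =====
-- stated objective: idiomatic
-- what changed: Replaced the explicit while-loop state machine (last_yes flag plus labels[-1].append) with itertools.groupby over enumerate, appending the index list of each nonzero run; the dead i==0 branch disappears.
import Mathlib
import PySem

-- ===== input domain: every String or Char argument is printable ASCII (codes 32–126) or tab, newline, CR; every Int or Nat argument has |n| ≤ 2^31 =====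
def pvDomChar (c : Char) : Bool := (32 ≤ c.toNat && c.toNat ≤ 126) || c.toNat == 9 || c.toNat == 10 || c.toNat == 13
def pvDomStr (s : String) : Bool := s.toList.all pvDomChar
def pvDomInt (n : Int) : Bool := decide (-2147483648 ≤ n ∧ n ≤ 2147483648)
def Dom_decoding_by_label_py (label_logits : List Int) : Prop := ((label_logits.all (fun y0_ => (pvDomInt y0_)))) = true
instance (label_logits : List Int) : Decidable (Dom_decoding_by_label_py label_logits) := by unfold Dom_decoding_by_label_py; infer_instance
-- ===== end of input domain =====

-- B replaces A's while-loop last_yes state machine with run-based grouping (itertools.groupby); same O(n) cost, more idiomatic.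

-- ===== PORT A =====
-- labels[-1].append(i): replace the last list by itself with i appended
-- (every reachable call has labels nonempty, so getLastD's default is never used)
def pvAppendLast (labels : List (List Int)) (i : Int) : List (List Int) :=
  labels.dropLast ++ [labels.getLastD [] ++ [i]]

-- one iteration of the while body; label_logits[i] is read with pyGetD (exact: i is always in range here)
def pvStepA (label_logits : List Int) (st : List (List Int) × Bool) (i : Int) :
    List (List Int) × Bool :=
  if PySem.List.pyGetD label_logits i 0 == 0 then (st.1, false)
  else if st.2 then (pvAppendLast (if i == 0 then st.1 ++ [[]] else st.1) i, true)
  else (pvAppendLast (st.1 ++ [[]]) i, true)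

def decoding_by_label_py (label_logits : List Int) : List (List Int) :=
  ((PySem.List.pyRange 0 (label_logits.length : Int) 1).foldl (pvStepA label_logits)
      ([], false)).1

-- ===== PORT B =====
-- groupby(enumerate(...), key=p[1] != 0): peel off one maximal run of equal key at a time
def pvGroupRuns : List (Int × Int) → List (List Int)
  | [] => []
  | (i, v) :: rest =>
    let k := v != 0
    let run := (i, v) :: rest.takeWhile (fun p => (p.2 != 0) == k)
    let rest' := rest.dropWhile (fun p => (p.2 != 0) == k)
    if k then run.map Prod.fst :: pvGroupRuns rest' else pvGroupRuns rest'
termination_by l => l.length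
decreasing_by all_goals exact Nat.lt_succ_of_le (List.length_dropWhile_le _ _)

def decoding_by_label_py_alt (label_logits : List Int) : List (List Int) :=
  pvGroupRuns (PySem.List.enumerate label_logits 0)

-- ===== PRECONDITION & SPEC =====
def Spec_decoding_by_label_py (label_logits : List Int) (out : List (List Int)) : Prop := out = decoding_by_label_py_alt label_logits
instance (label_logits : List Int) (out : List (List Int)) : Decidable (Spec_decoding_by_label_py label_logits out) := by unfold Spec_decoding_by_label_py; infer_instance

-- ===== CLAIM (what is proved, stated in full; the proofs are below) =====
def Claim_equal_decoding_by_label_py : Prop := ∀ (label_logits : List Int), Dom_decoding_by_label_py label_logits → Spec_decoding_by_label_py label_logits (decoding_by_label_py label_logits)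

-- ===== LEMMAS AND PROOFS =====

-- A's step rephrased on (index, value) pairs; pvStepA l st j = pvPairStep st (j, l[j]) by rfl
def pvPairStep (st : List (List Int) × Bool) (p : Int × Int) : List (List Int) × Bool :=
  if p.2 == 0 then (st.1, false)
  else if st.2 then (pvAppendLast (if p.1 == 0 then st.1 ++ [[]] else st.1) p.1, true)
  else (pvAppendLast (st.1 ++ [[]]) p.1, true)

lemma pvBridge (l : List Int) (st : List (List Int) × Bool) :
    (PySem.List.pyRange 0 (l.length : Int) 1).foldl (pvStepA l) st
      = (PySem.List.enumerate l 0).foldl pvPairStep st := by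
  rw [PySem.List.enumerate_eq_map_pyRange (d := 0), List.foldl_map]
  rfl

lemma pvSkipZero (rest : List (Int × Int)) :
    pvGroupRuns (rest.dropWhile (fun p => !(p.2 != 0))) = pvGroupRuns rest := by
  cases rest with
  | nil => rfl
  | cons q qs =>
    by_cases hq : q.2 = 0
    · rw [List.dropWhile_cons_of_pos (by simp [hq])]
      conv_rhs => rw [pvGroupRuns]
      simp [hq]
    · rw [List.dropWhile_cons_of_neg (by simp [hq])]

lemma pvMain (ps : List (Int × Int)) (hp : ps.Pairwise (fun a b => a.1 < b.1)) :
    ((∀ p ∈ ps, 0 ≤ p.1) → ∀ labels,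
        (ps.foldl pvPairStep (labels, false)).1 = labels ++ pvGroupRuns ps)
    ∧ ((∀ p ∈ ps, 0 < p.1) → ∀ labels run,
        (ps.foldl pvPairStep (labels ++ [run], true)).1
          = labels ++ (run ++ (ps.takeWhile (fun p => p.2 != 0)).map Prod.fst)
              :: pvGroupRuns (ps.dropWhile (fun p => p.2 != 0))) := by
  induction ps with
  | nil => simp [pvGroupRuns]
  | cons q rest ih =>
    obtain ⟨i, v⟩ := q
    rw [List.pairwise_cons] at hp
    have ih' := ih hp.2
    constructor
    · intro h0 labels
      by_cases hv : v = 0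
      · subst hv
        have hst : pvPairStep (labels, false) (i, 0) = (labels, false) := by
          simp [pvPairStep]
        rw [List.foldl_cons, hst, ih'.1 (fun p hm => h0 p (List.mem_cons_of_mem _ hm)) labels]
        conv_rhs => rw [pvGroupRuns]
        simp [pvSkipZero]
      · have hpos : ∀ p ∈ rest, 0 < p.1 := by
          intro p hm
          have := hp.1 p hm
          have := h0 (i, v) (List.mem_cons_self)
          simp at this ⊢; omega
        have hst : pvPairStep (labels, false) (i, v) = (labels ++ [[i]], true) := by
          simp [pvPairStep, pvAppendLast, hv]
        rw [List.foldl_cons, hst, ih'.2 hpos labels [i]]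
        have hpred : (fun p : Int × Int => (p.2 != 0) == (v != 0)) = (fun p => p.2 != 0) := by
          have hv' : (v != 0) = true := by simpa using hv
          funext p; rw [hv']; cases (p.2 != 0) <;> rfl
        conv_rhs => rw [pvGroupRuns]
        simp [hv, hpred]
    · intro h0 labels run
      by_cases hv : v = 0
      · subst hv
        have hst : pvPairStep (labels ++ [run], true) (i, 0) = (labels ++ [run], false) := by
          simp [pvPairStep]
        rw [List.foldl_cons, hst,
          ih'.1 (fun p hm => le_of_lt (h0 p (List.mem_cons_of_mem _ hm))) (labels ++ [run])]
        rw [List.takeWhile_cons_of_neg (by simp), List.dropWhile_cons_of_neg (by simp)]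
        conv_rhs => rw [pvGroupRuns]
        simp [pvSkipZero]
      · have hi : (0 : Int) < i := h0 (i, v) (List.mem_cons_self)
        have hi0 : i ≠ 0 := by omega
        have hst : pvPairStep (labels ++ [run], true) (i, v) = (labels ++ [run ++ [i]], true) := by
          simp [pvPairStep, pvAppendLast, hv, hi0]
        rw [List.foldl_cons, hst, ih'.2 (fun p hm => lt_trans hi (hp.1 p hm)) labels (run ++ [i])]
        rw [List.takeWhile_cons_of_pos (by simpa using hv),
          List.dropWhile_cons_of_pos (by simpa using hv)]
        simp

-- ===== VERDICT (by name: the statement is the Claim_ definition above) =====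
theorem decoding_by_label_py_spec : Claim_equal_decoding_by_label_py := by
  intro l _
  unfold Spec_decoding_by_label_py decoding_by_label_py decoding_by_label_py_alt
  rw [pvBridge]
  have hnn : ∀ p ∈ PySem.List.enumerate l 0, 0 ≤ p.1 := by
    intro p hm
    rw [PySem.List.mem_enumerate_iff] at hm
    obtain ⟨k, hk, rfl⟩ := hm
    simp
  have := (pvMain (PySem.List.enumerate l 0) (PySem.List.pairwise_lt_enumerate l 0)).1 hnn []
  simpa using this
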